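-- pv_equiv track=rewrite | github.com/MrBrantCode/unitest_baseline | mut_generate/mist_train_cf/cf_96344/solution.py | filter_unique_strings
-- ===== SOURCE A (Python) =====
-- def filter_unique_strings(strings):
--     vowels = ['a', 'e', 'i', 'o', 'u']
--     string_counts = {}
--
--     for string in strings:
--         string_counts[string] = string_counts.get(string, 0) + 1
--
--     unique_strings = []
--
--     for string, count in string_counts.items():
--         if count == 1 and not string.lower().startswith(tuple(vowels)):
--             unique_strings.append(string)
--
--     unique_strings.sort(key=lambda x: (-len(x), x))
--
--     return unique_strings
-- ===== SOURCE B (Python) =====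
-- def filter_unique_strings(strings):
--     vowels = ('a', 'e', 'i', 'o', 'u')
--     srt = sorted(strings)
--     n = len(srt)
--     survivors = []
--     i = 0
--     while i < n:
--         j = i + 1
--         while j < n and srt[j] == srt[i]:
--             j += 1
--         if j == i + 1 and not srt[i].lower().startswith(vowels):
--             survivors.append(srt[i])
--         i = j
--     survivors.sort(key=lambda x: (-len(x), x))
--     return survivors
-- ===== Notes on version B (the rewrite author's own statement) =====
-- stated objective: alternative
-- what changed: Replaces the count-dictionary/threshold pass with a sort of the input followed by a single adjacency (run-length) scan that keeps exactly the strings occurring once, then the same (-len, x) sort of the survivors.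
import Mathlib
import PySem

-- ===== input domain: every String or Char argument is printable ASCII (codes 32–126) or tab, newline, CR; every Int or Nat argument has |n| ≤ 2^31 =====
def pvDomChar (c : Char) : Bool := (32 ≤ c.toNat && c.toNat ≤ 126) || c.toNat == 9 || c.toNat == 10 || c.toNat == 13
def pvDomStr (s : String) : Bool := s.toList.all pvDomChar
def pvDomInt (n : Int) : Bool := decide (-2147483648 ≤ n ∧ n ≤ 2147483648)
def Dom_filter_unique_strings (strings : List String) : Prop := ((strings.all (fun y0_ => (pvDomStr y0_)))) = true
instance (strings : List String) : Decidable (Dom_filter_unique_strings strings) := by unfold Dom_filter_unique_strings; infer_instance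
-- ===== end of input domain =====

-- B replaces A's count-dictionary pass with sort + adjacency run scan collecting the once-occurring strings (alternative algorithm, same result).

-- ===== PORT A =====
-- sort key (-len(x), x): lexicographic pair, exactly Python's tuple comparison
def pvKeyA (x : String) : Lex (Int × String) := toLex (-(PySem.Str.len x), x)

def filter_unique_strings (strings : List String) : List String :=
  let vowels : List String := ["a", "e", "i", "o", "u"]
  let string_counts : PySem.Dict String Int :=
    strings.foldl (fun d x => d.insert x (d.getD x 0 + 1)) PySem.Dict.empty
  let unique_strings : List String :=
    string_counts.items.foldl (fun acc p =>
      if p.2 == 1 && !(vowels.any (fun v => PySem.Str.startswith (PySem.Str.lower p.1) v))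
      then acc ++ [p.1] else acc) []
  PySem.List.sorted unique_strings pvKeyA

-- ===== PORT B =====
def pvKeyB (x : String) : Lex (Int × String) := toLex (-(PySem.Str.len x), x)

def pvVowelStartB (s : String) : Bool :=
  ["a", "e", "i", "o", "u"].any (fun v => PySem.Str.startswith (PySem.Str.lower s) v)

-- the outer while-loop of Source B: each step consumes one run of equal strings from the sorted list
def pvCollectOnce : List String → List String
  | [] => []
  | s :: rest =>
      (if (rest.takeWhile (fun t => t == s)).isEmpty && !pvVowelStartB s then [s] else [])
        ++ pvCollectOnce (rest.dropWhile (fun t => t == s))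
termination_by xs => xs.length
decreasing_by
  simpa using Nat.lt_succ_of_le (List.length_dropWhile_le _ _)

def filter_unique_strings_alt (strings : List String) : List String :=
  let srt := PySem.List.sorted strings (fun x => x)
  PySem.List.sorted (pvCollectOnce srt) pvKeyB

-- ===== PRECONDITION & SPEC =====
def Spec_filter_unique_strings (strings : List String) (out : List String) : Prop := out = filter_unique_strings_alt strings
instance (strings : List String) (out : List String) : Decidable (Spec_filter_unique_strings strings out) := by unfold Spec_filter_unique_strings; infer_instance

-- ===== CLAIM (what is proved, stated in full; the proofs are below) =====
def Claim_equal_filter_unique_strings : Prop := ∀ (strings : List String), Dom_filter_unique_strings strings → Spec_filter_unique_strings strings (filter_unique_strings strings)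

-- ===== LEMMAS AND PROOFS =====

theorem pvKeyB_inj (a b : String) (h : pvKeyB a = pvKeyB b) : a = b := by
  have := congrArg (fun p => (ofLex p).2) h
  simpa [pvKeyB] using this

-- head of dropWhile fails the predicate
theorem pv_dropWhile_head_false {p : String → Bool} :
    ∀ (l : List String) {t : String} {tt : List String},
      l.dropWhile p = t :: tt → p t = false := by
  intro l
  induction l with
  | nil => intro t tt h; simp at h
  | cons a l ih =>
      intro t tt h
      by_cases hp : p a = true
      · rw [List.dropWhile_cons_of_pos hp] at h
        exact ih h
      · rw [List.dropWhile_cons_of_neg (by simpa using hp)] at h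
        cases h
        simpa using hp

-- the run scan over a non-decreasing list yields, without repetition, exactly the strings
-- occurring once that do not start with a vowel
theorem pvCollectOnce_spec :
    ∀ (n : Nat) (xs : List String), xs.length ≤ n → xs.Pairwise (· ≤ ·) →
      (pvCollectOnce xs).Nodup ∧
      ∀ x, (x ∈ pvCollectOnce xs ↔ (xs.count x = 1 ∧ pvVowelStartB x = false)) := by
  intro n
  induction n with
  | zero =>
      intro xs hlen _
      have hnil : xs = [] := List.length_eq_zero_iff.mp (Nat.le_zero.mp hlen)
      subst hnil
      constructor
      · simp [pvCollectOnce]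
      · intro x; simp [pvCollectOnce]
  | succ n ih =>
      intro xs hlen hpw
      cases xs with
      | nil =>
          constructor
          · simp [pvCollectOnce]
          · intro x; simp [pvCollectOnce]
      | cons s rest =>
          set run := rest.takeWhile (fun t => t == s) with hrun
          set tail := rest.dropWhile (fun t => t == s) with htail
          have hsplit : run ++ tail = rest := by
            rw [hrun, htail]; exact List.takeWhile_append_dropWhile
          have htail_sub : tail.Sublist rest := by
            rw [htail]; exact List.dropWhile_sublist _
          have htail_len : tail.length ≤ n := by
            have h1 : tail.length ≤ rest.length := htail_sub.length_le
            have h2 : rest.length + 1 ≤ n + 1 := by simpa using hlen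
            omega
          have htail_pw : tail.Pairwise (· ≤ ·) := hpw.sublist (htail_sub.cons s)
          have hrest_le : ∀ t ∈ rest, s ≤ t := (List.pairwise_cons.mp hpw).1
          have hrun_eq : ∀ t ∈ run, t = s := by
            intro t ht
            rw [hrun] at ht
            have := List.mem_takeWhile_imp ht
            simpa using this
          -- every element of tail is strictly greater than s
          have htail_gt : ∀ t ∈ tail, s < t := by
            cases h0 : tail with
            | nil => simp
            | cons t0 tt =>
                intro t ht
                have ht0f : (t0 == s) = false :=
                  pv_dropWhile_head_false (p := fun t => t == s) rest (by rw [← htail]; exact h0)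
                have ht0ne : t0 ≠ s := by simpa using ht0f
                have ht0mem : t0 ∈ rest := htail_sub.subset (by rw [h0]; simp)
                have hst0 : s < t0 := lt_of_le_of_ne (hrest_le t0 ht0mem) (Ne.symm ht0ne)
                have hpw0 := htail_pw
                rw [h0] at hpw0
                rcases List.mem_cons.mp ht with rfl | htt
                · exact hst0
                · exact lt_of_lt_of_le hst0 ((List.pairwise_cons.mp hpw0).1 t htt)
          have hs_not_tail : s ∉ tail := fun h => absurd (htail_gt s h) (lt_irrefl s)
          have hcount_run : run.count s = run.length :=
            List.count_eq_length.mpr (fun t ht => (hrun_eq t ht).symm)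
          have hcount_tail_s : tail.count s = 0 := List.count_eq_zero.mpr hs_not_tail
          obtain ⟨ihnd, ihmem⟩ := ih tail htail_len htail_pw
          have hs_notrec : s ∉ pvCollectOnce tail := by
            intro hmem
            have h1 := ((ihmem s).mp hmem).1
            rw [hcount_tail_s] at h1
            exact absurd h1 (by decide)
          have hunfold : pvCollectOnce (s :: rest) =
              (if run.isEmpty && !pvVowelStartB s then [s] else []) ++ pvCollectOnce tail := by
            rw [pvCollectOnce]
          have hsub : (if run.isEmpty && !pvVowelStartB s then [s] else []) ⊆ [s] := by
            split
            · exact fun a ha => ha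
            · simp
          have hcount : ∀ x, (s :: rest).count x =
              (if x = s then run.length + 1 else tail.count x) := by
            intro x
            rw [← hsplit]
            by_cases hx : x = s
            · subst hx
              simp [List.count_append, hcount_run, hcount_tail_s]
            · have hcr : run.count x = 0 :=
                List.count_eq_zero.mpr (fun hm => hx (hrun_eq x hm))
              have hx' : ¬s = x := fun h => hx h.symm
              simp [List.count_append, hcr, hx, hx']
          constructor
          · rw [hunfold]
            by_cases hc : (run.isEmpty && !pvVowelStartB s) = true
            · rw [if_pos hc]
              simp only [List.singleton_append, List.nodup_cons]
              exact ⟨hs_notrec, ihnd⟩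
            · rw [if_neg hc]
              simpa using ihnd
          · intro x
            rw [hunfold, hcount x]
            by_cases hx : x = s
            · subst hx
              rw [if_pos rfl]
              constructor
              · intro hmem
                rcases List.mem_append.mp hmem with hin | hin
                · by_cases hc : (run.isEmpty && !pvVowelStartB x) = true
                  · have h1 : run.isEmpty = true ∧ (!pvVowelStartB x) = true := by
                      constructor
                      · exact (Bool.and_eq_true_iff.mp hc).1
                      · exact (Bool.and_eq_true_iff.mp hc).2
                    have hr0 : run.length = 0 := by
                      rw [List.isEmpty_iff] at h1
                      simp [h1.1]
                    constructor
                    · omega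
                    · simpa using h1.2
                  · rw [if_neg hc] at hin
                    simp at hin
                · exact absurd hin hs_notrec
              · rintro ⟨h1, h2⟩
                have hr : run = [] := List.length_eq_zero_iff.mp (by omega)
                apply List.mem_append.mpr
                left
                rw [hr]
                simp [h2]
            · rw [if_neg hx]
              constructor
              · intro hmem
                rcases List.mem_append.mp hmem with hin | hin
                · exact absurd (List.mem_singleton.mp (hsub hin)) hx
                · exact (ihmem x).mp hin
              · intro h
                exact List.mem_append.mpr (Or.inr ((ihmem x).mpr h))

theorem filter_unique_strings_spec : Claim_equal_filter_unique_strings := by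
  intro strings _
  unfold Spec_filter_unique_strings
  -- A's value: the filtered first-occurrence list, sorted by (-len, x)
  have hA : filter_unique_strings strings =
      PySem.List.sorted
        ((PySem.Set.ofList strings).filter
          (fun k => ((strings.count k : Int) == 1) && !pvVowelStartB k)) pvKeyA := by
    unfold filter_unique_strings
    simp only [PySem.Dict.foldl_insert_getD_add_one_eq_counter, PySem.Dict.items_counter,
      List.foldl_map, PySem.List.foldl_append_if]
    simp [pvVowelStartB]
  rw [hA]
  show _ = PySem.List.sorted (pvCollectOnce (PySem.List.sorted strings (fun x => x))) pvKeyB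
  set srt := PySem.List.sorted strings (fun x => x) with hsrt
  set LA := (PySem.Set.ofList strings).filter
      (fun k => ((strings.count k : Int) == 1) && !pvVowelStartB k) with hLA
  have hsrtpw : srt.Pairwise (· ≤ ·) := by
    have := PySem.List.sorted_pairwise strings (fun x => x)
    simpa [hsrt] using this
  obtain ⟨ndB, memB⟩ := pvCollectOnce_spec srt.length srt le_rfl hsrtpw
  have hcnt : ∀ x, srt.count x = strings.count x := by
    intro x
    exact (PySem.List.sorted_perm strings (fun x => x) false).count_eq x
  have ndA : LA.Nodup := (PySem.Set.nodup_ofList strings).filter _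
  have hmemiff : ∀ x, x ∈ pvCollectOnce srt ↔ x ∈ LA := by
    intro x
    rw [memB x, hLA, List.mem_filter]
    constructor
    · rintro ⟨h1, h2⟩
      rw [hcnt x] at h1
      refine ⟨?_, ?_⟩
      · rw [PySem.Set.mem_ofList]
        exact List.count_pos_iff.mp (by omega)
      · simp [h1, h2]
    · rintro ⟨h1, h2⟩
      have h3 : ((strings.count x : Int) = 1) ∧ pvVowelStartB x = false := by
        simpa using h2
      refine ⟨?_, h3.2⟩
      rw [hcnt x]
      exact_mod_cast h3.1
  have hperm : (PySem.List.sorted (pvCollectOnce srt) pvKeyB).Perm LA :=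
    (PySem.List.sorted_perm _ pvKeyB false).trans
      ((List.perm_ext_iff_of_nodup ndB ndA).mpr hmemiff)
  have ndS : (PySem.List.sorted (pvCollectOnce srt) pvKeyB).Nodup :=
    ((PySem.List.sorted_perm _ pvKeyB false).nodup_iff).mpr ndB
  have hle := PySem.List.sorted_pairwise (pvCollectOnce srt) pvKeyB
  have hlt : (PySem.List.sorted (pvCollectOnce srt) pvKeyB).Pairwise
      (fun a b => pvKeyB a < pvKeyB b) := by
    have hand := List.Pairwise.and hle ndS
    exact hand.imp (fun h =>
      lt_of_le_of_ne h.1 (fun he => h.2 (pvKeyB_inj _ _ he)))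
  have hk : pvKeyA = pvKeyB := rfl
  rw [hk]
  exact PySem.List.sorted_eq_of_perm_of_pairwise_lt LA _ pvKeyB hperm hlt
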